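-- pv_equiv track=rewrite | github.com/jaquinocode/my-algorithms-python | latin_square.py | latin_square
-- ===== SOURCE A (Python) =====
-- def latin_square(matrix):
--   diagonal_sum = find_diagonal_sum(matrix)
--   num_of_dirty_rows = 0
--   num_of_dirty_cols = 0
--   #check amount of rows that have repeats, called dirty row
--   for row in matrix:
--     num_of_dirty_rows += is_dirty_row(row)
--
--   #check amount of columns that have repeats, called dirty column
--   for k in range(len(matrix[0])):
--     num_of_dirty_cols += is_dirty_col(k, matrix)
--
--   return diagonal_sum, num_of_dirty_rows, num_of_dirty_cols
--
-- def find_diagonal_sum(matrix):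
--   i, k = 0, 0
--   sum = 0
--   while not(i == len(matrix)):
--     sum += matrix[i][k]
--
--     i += 1
--     k += 1
--   return sum
--
-- def is_dirty_row(row):
--   #row is an array [1, 2, 2]
--   #put array into a set {1, 2}
--   row_set = set(row)
--   does_repeat = len(row_set) != len(row)
--   return does_repeat
--
-- def is_dirty_col(k, matrix):
--   #array of column elems
--   column = []
--   for i in range(len(matrix)):
--     column.append(matrix[i][k])
--   col_set = set(column)
--   does_repeat = len(col_set) != len(column)
--   return does_repeat
-- ===== SOURCE B (Python) =====
-- def latin_square(matrix):
--   n = len(matrix[0])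
--   diagonal_sum = 0
--   num_of_dirty_rows = 0
--   seen = [set() for _ in range(n)]  # per-column sets of values seen so far
--   for i, row in enumerate(matrix):
--     diagonal_sum += row[i]
--     if len(set(row)) != len(row):
--       num_of_dirty_rows += 1
--     seen = [s | {row[j]} for j, s in enumerate(seen)]
--   num_of_dirty_cols = sum(1 for s in seen if len(s) != len(matrix))
--   return diagonal_sum, num_of_dirty_rows, num_of_dirty_cols
-- ===== Notes on version B (the rewrite author's own statement) =====
-- stated objective: alternative
-- what changed: B replaces A's three independent traversals (diagonal while-loop, row pass, per-column rebuild via is_dirty_col) with a single enumerate pass that accumulates the diagonal sum, the dirty-row count, and per-column running 'seen' sets, counting dirty columns from the set sizes at the end.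
import Mathlib
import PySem

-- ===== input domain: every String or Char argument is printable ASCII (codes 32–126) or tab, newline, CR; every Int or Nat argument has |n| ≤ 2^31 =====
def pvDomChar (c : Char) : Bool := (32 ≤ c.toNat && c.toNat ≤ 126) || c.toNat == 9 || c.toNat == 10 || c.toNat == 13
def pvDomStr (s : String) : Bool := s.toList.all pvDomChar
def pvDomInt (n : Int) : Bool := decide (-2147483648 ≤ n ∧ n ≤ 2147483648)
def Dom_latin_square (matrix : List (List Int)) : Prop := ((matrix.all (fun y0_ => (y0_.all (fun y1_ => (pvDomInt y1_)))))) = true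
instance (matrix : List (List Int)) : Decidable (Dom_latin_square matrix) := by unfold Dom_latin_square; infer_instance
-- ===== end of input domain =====

-- B replaces A's three separate passes (diagonal while-loop, row pass, per-column rebuild) with one enumerate pass keeping per-column running sets; equal return values on Pre_ (outside it Python A raises IndexError).


-- ===== PORT A =====
def pvFindDiagonalSum (matrix : List (List Int)) : Int :=
  (List.range matrix.length).foldl
    (fun s (i : Nat) => s + ((PySem.List.pyGet? ((PySem.List.pyGet? matrix (i : Int)).getD []) (i : Int)).getD 0)) 0

def pvIsDirtyRow (row : List Int) : Bool :=
  (PySem.Set.ofList row).length != row.length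

def pvIsDirtyCol (k : Nat) (matrix : List (List Int)) : Bool :=
  let column := (List.range matrix.length).foldl
    (fun acc (i : Nat) => acc ++ [(PySem.List.pyGet? ((PySem.List.pyGet? matrix (i : Int)).getD []) (k : Int)).getD 0]) []
  (PySem.Set.ofList column).length != column.length

def latin_square (matrix : List (List Int)) : Int × Int × Int :=
  let diagonal_sum := pvFindDiagonalSum matrix
  let num_of_dirty_rows := matrix.foldl (fun n row => n + (if pvIsDirtyRow row then 1 else 0)) 0
  let num_of_dirty_cols := (List.range ((PySem.List.pyGet? matrix 0).getD []).length).foldl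
    (fun n (k : Nat) => n + (if pvIsDirtyCol k matrix then 1 else 0)) 0
  (diagonal_sum, num_of_dirty_rows, num_of_dirty_cols)

-- ===== PORT B =====
def pvStepB (st : Int × Int × List (PySem.Set Int)) (p : Int × List Int) : Int × Int × List (PySem.Set Int) :=
  (st.1 + ((PySem.List.pyGet? p.2 p.1).getD 0),
   st.2.1 + (if (PySem.Set.ofList p.2).length != p.2.length then 1 else 0),
   (PySem.List.enumerate st.2.2 0).map
     (fun q => PySem.Set.union q.2 (PySem.Set.ofList [(PySem.List.pyGet? p.2 q.1).getD 0])))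

def latin_square_alt (matrix : List (List Int)) : Int × Int × Int :=
  let n := ((PySem.List.pyGet? matrix 0).getD []).length
  let st := (PySem.List.enumerate matrix 0).foldl pvStepB
    (0, 0, (List.range n).map (fun _ => (PySem.Set.empty : PySem.Set Int)))
  (st.1, st.2.1,
   st.2.2.foldl (fun c s => c + (if s.length != matrix.length then 1 else 0)) 0)

-- ===== PRECONDITION & SPEC =====
-- Pre_ excludes exactly the inputs on which Python A raises IndexError: the empty matrix
-- (A evaluates matrix[0]) and ragged matrices where some row i has len(row) <= i (diagonal
-- access matrix[i][i]) or len(row) < len(matrix[0]) (column access matrix[i][k]).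
def Pre_latin_square (matrix : List (List Int)) : Prop :=
  matrix ≠ [] ∧ ∀ i < matrix.length,
    i < (matrix.getD i []).length ∧ (matrix.getD 0 []).length ≤ (matrix.getD i []).length
instance (matrix : List (List Int)) : Decidable (Pre_latin_square matrix) := by
  unfold Pre_latin_square; infer_instance
def pvWitness_latin_square : List (List Int) := [[1, 2], [2, 1]]
def Spec_latin_square (matrix : List (List Int)) (out : Int × Int × Int) : Prop := out = latin_square_alt matrix
instance (matrix : List (List Int)) (out : Int × Int × Int) : Decidable (Spec_latin_square matrix out) := by unfold Spec_latin_square; infer_instance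

-- ===== CLAIM (what is proved, stated in full; the proofs are below) =====
def Claim_equal_latin_square : Prop := ∀ (matrix : List (List Int)), Dom_latin_square matrix → Pre_latin_square matrix → Spec_latin_square matrix (latin_square matrix)

-- ===== LEMMAS AND PROOFS =====
def pvColF (j : Nat) (row : List Int) : Int := (PySem.List.pyGet? row (j : Int)).getD 0

def pvDiag : List (List Int) → Nat → Int
  | [], _ => 0
  | row :: ms, i => ((PySem.List.pyGet? row (i : Int)).getD 0) + pvDiag ms (i + 1)

def pvColSet (j : Nat) (ms : List (List Int)) (s : PySem.Set Int) : PySem.Set Int :=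
  ms.foldl (fun s row => PySem.Set.add s (pvColF j row)) s

lemma pv_seen_map (n : Nat) (S : Nat → PySem.Set Int) (row : List Int) :
    (PySem.List.enumerate ((List.range n).map S) 0).map
      (fun q => PySem.Set.union q.2 (PySem.Set.ofList [(PySem.List.pyGet? row q.1).getD 0]))
    = (List.range n).map (fun j => PySem.Set.add (S j) (pvColF j row)) := by
  apply List.ext_getElem
  · simp [PySem.List.length_enumerate]
  · intro k h1 h2
    simp [PySem.List.getElem_enumerate, pvColF, PySem.Set.union, PySem.Set.update,
      PySem.Set.ofList, PySem.Set.add]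

lemma pv_bloop (ms : List (List Int)) : ∀ (i0 : Nat) (d r : Int) (n : Nat) (S : Nat → PySem.Set Int),
    (PySem.List.enumerate ms ((i0 : Nat) : Int)).foldl pvStepB (d, r, (List.range n).map S)
    = (d + pvDiag ms i0,
       r + (ms.map (fun row => if (PySem.Set.ofList row).length != row.length then (1:Int) else 0)).sum,
       (List.range n).map (fun j => pvColSet j ms (S j))) := by
  induction ms with
  | nil => intro i0 d r n S; simp [PySem.List.enumerate, pvDiag, pvColSet]
  | cons row ms ih =>
    intro i0 d r n S
    rw [PySem.List.enumerate_cons]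
    have h1 : ((i0 : Nat) : Int) + 1 = ((i0 + 1 : Nat) : Int) := by push_cast; ring
    simp only [List.foldl_cons, pvStepB, pv_seen_map, h1, ih]
    simp [pvDiag, pvColSet, add_assoc]

lemma pv_diagA (ms : List (List Int)) : ∀ (i0 : Nat),
    ((List.range ms.length).map (fun (k : Nat) =>
      (PySem.List.pyGet? ((PySem.List.pyGet? ms (k : Int)).getD []) ((i0 + k : Nat) : Int)).getD 0)).sum
    = pvDiag ms i0 := by
  induction ms with
  | nil => intro i0; simp [pvDiag]
  | cons row ms ih =>
    intro i0
    rw [List.length_cons, List.range_succ_eq_map, List.map_cons, List.map_map, List.sum_cons]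
    have h2 : ((fun (k : Nat) => (PySem.List.pyGet? ((PySem.List.pyGet? (row :: ms) (k : Int)).getD []) ((i0 + k : Nat) : Int)).getD 0) ∘ Nat.succ)
        = (fun (k : Nat) => (PySem.List.pyGet? ((PySem.List.pyGet? ms (k : Int)).getD []) (((i0 + 1) + k : Nat) : Int)).getD 0) := by
      funext k
      simp only [Function.comp, PySem.List.pyGet?_natCast, Nat.succ_eq_add_one,
        List.getElem?_cons_succ]
      ring_nf
    rw [h2, ih]
    simp [pvDiag, PySem.List.pyGet?_natCast]

lemma pv_colA (k : Nat) (matrix : List (List Int)) :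
    pvIsDirtyCol k matrix
    = ((pvColSet k matrix PySem.Set.empty).length != matrix.length) := by
  unfold pvIsDirtyCol
  simp only [PySem.List.foldl_append_singleton_eq_map, List.nil_append]
  have h1 : (List.range matrix.length).map
      (fun (i : Nat) => (PySem.List.pyGet? ((PySem.List.pyGet? matrix (i : Int)).getD []) (k : Int)).getD 0)
      = matrix.map (fun row => pvColF k row) := by
    apply List.ext_getElem
    · simp
    · intro j hj1 hj2
      simp at hj1
      simp [pvColF, PySem.List.pyGet?_natCast]
      rw [List.getElem?_eq_getElem hj1]
      simp
  rw [h1]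
  have h2 : pvColSet k matrix PySem.Set.empty = PySem.Set.ofList (matrix.map (fun row => pvColF k row)) := by
    rw [PySem.Set.ofList_eq_foldl, List.foldl_map]; rfl
  rw [h2]
  simp

theorem pv_main (matrix : List (List Int)) : latin_square matrix = latin_square_alt matrix := by
  unfold latin_square latin_square_alt
  have hb := pv_bloop matrix 0 0 0 (((PySem.List.pyGet? matrix 0).getD []).length) (fun _ => PySem.Set.empty)
  simp only [Nat.cast_zero] at hb
  dsimp only
  rw [hb]
  refine Prod.ext ?_ (Prod.ext ?_ ?_)
  · show pvFindDiagonalSum matrix = _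
    unfold pvFindDiagonalSum
    rw [PySem.List.foldl_add]
    have hd := pv_diagA matrix 0
    simp only [Nat.zero_add, PySem.List.pyGet?_natCast] at hd
    simpa using hd
  · show matrix.foldl _ 0 = _
    rw [PySem.List.foldl_add]
    simp [pvIsDirtyRow]
  · show (List.range _).foldl _ 0 = _
    rw [List.foldl_map]
    simp [pv_colA]

-- ===== VERDICT (by name: the statement is the Claim_ definition above) =====
theorem latin_square_spec : Claim_equal_latin_square := by
  intro matrix _ _
  exact pv_main matrix
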